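-- pv_equiv track=rewrite | github.com/ata-turhan/Leetcode-Solutions | 2204-find-subsequence-of-length-k-with-the-largest-sum/find-subsequence-of-length-k-with-the-largest-sum.py | maxSubsequence
-- ===== SOURCE A (Python) =====
-- from typing import List
-- from collections import Counter
--
-- def maxSubsequence(nums: List[int], k: int) -> List[int]:
--     """
--     Returns a subsequence of length k with the maximum possible sum,
--     preserving the relative order of elements in `nums`.
--     """
--     # Count the k largest elements (may include duplicates)
--     top_k_counts = Counter(sorted(nums)[-k:])
--
--     subsequence: List[int] = []
--     for num in nums:
--         if top_k_counts[num] > 0: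
--             subsequence.append(num)
--             top_k_counts[num] -= 1
--
--     return subsequence
-- ===== SOURCE B (Python) =====
-- from typing import List
--
-- def maxSubsequence(nums: List[int], k: int) -> List[int]:
--     """
--     Subsequence of length k with maximum sum, order preserved.
--     Comparison-counting rule: keep nums[i] iff fewer than k elements
--     beat it, where y beats nums[i] if y is larger, or equal to it and
--     occurs earlier.  No sorting, no counter, no stateful selection scan.
--     """
--     def beats(i: int) -> int:
--         x = nums[i]
--         return sum(1 for y in nums if y > x) + sum(1 for y in nums[:i] if y == x)
--     return [x for i, x in enumerate(nums) if beats(i) < k]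
-- ===== Notes on version B (the rewrite author's own statement) =====
-- stated objective: simpler
-- what changed: Replaces sort + Counter-of-top-k-slice + stateful selection scan with a stateless comparison-counting rule: keep nums[i] iff fewer than k elements beat it (larger, or equal and earlier), a single filter with no sorting and no mutable counter.
-- outside the precondition, e.g. on maxSubsequence([1], 0): A returns [1], B returns []; on maxSubsequence([1, 2], -1): A returns [2], B returns []
import Mathlib
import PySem

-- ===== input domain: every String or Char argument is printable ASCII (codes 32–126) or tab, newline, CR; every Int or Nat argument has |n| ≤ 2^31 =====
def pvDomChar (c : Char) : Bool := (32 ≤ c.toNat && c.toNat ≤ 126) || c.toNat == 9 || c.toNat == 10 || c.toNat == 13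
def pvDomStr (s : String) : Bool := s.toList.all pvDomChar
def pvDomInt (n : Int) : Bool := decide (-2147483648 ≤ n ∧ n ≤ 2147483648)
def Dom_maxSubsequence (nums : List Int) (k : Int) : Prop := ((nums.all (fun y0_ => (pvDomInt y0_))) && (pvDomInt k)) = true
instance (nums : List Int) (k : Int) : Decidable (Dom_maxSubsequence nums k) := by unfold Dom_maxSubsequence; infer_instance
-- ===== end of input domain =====

-- B replaces A's sort + Counter-of-top-k-slice + stateful selection scan by a stateless
-- comparison-counting filter: keep nums[i] iff fewer than k elements beat it (larger, or
-- equal and earlier); no sorting, no counter (objective: simpler; not faster — O(n^2)).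

-- ===== PORT A =====
-- one step of A's loop body: if top_k_counts[num] > 0: append num; top_k_counts[num] -= 1
def pvStepA (st : PySem.Dict Int Int × List Int) (num : Int) : PySem.Dict Int Int × List Int :=
  if st.1.getD num 0 > 0 then (st.1.insert num (st.1.getD num 0 - 1), st.2 ++ [num]) else st

def maxSubsequence (nums : List Int) (k : Int) : List Int :=
  -- top_k_counts = Counter(sorted(nums)[-k:])
  let topKCounts := PySem.Dict.counter (PySem.List.slice (PySem.List.sorted nums (fun x => x)) (some (-k)) none)
  (nums.foldl pvStepA (topKCounts, [])).2

-- ===== PORT B =====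
-- beats(i): how many elements beat nums[i] — larger anywhere, or equal and strictly earlier
def pvBeats (nums : List Int) (i : Int) (x : Int) : Int :=
  ((nums.countP (fun y => decide (x < y)) : Int)) +
  (((PySem.List.slice nums none (some i)).countP (fun y => decide (y = x)) : Int))

def maxSubsequence_alt (nums : List Int) (k : Int) : List Int :=
  ((PySem.List.enumerate nums).filter (fun p => decide (pvBeats nums p.1 p.2 < k))).map (·.2)

-- ===== PRECONDITION & SPEC =====
-- Pre_ excludes the out-of-domain corner k <= 0 with 0 < k + len(nums) (a request for a
-- subsequence of non-positive length): there A's slice sorted(nums)[-k:] accidentally keeps the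
-- top len(nums)+k elements (the whole list when k == 0) while B's natural answer is the empty
-- subsequence, and neither value is specified.
def Pre_maxSubsequence (nums : List Int) (k : Int) : Prop := 1 ≤ k ∨ k + (nums.length : Int) ≤ 0
instance (nums : List Int) (k : Int) : Decidable (Pre_maxSubsequence nums k) := by unfold Pre_maxSubsequence; infer_instance

def pvWitness_maxSubsequence : List Int × Int := ([3, 1, 2], 2)

def Spec_maxSubsequence (nums : List Int) (k : Int) (out : List Int) : Prop := out = maxSubsequence_alt nums k
instance (nums : List Int) (k : Int) (out : List Int) : Decidable (Spec_maxSubsequence nums k out) := by unfold Spec_maxSubsequence; infer_instance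

-- ===== CLAIM (what is proved, stated in full; the proofs are below) =====
def Claim_equal_maxSubsequence : Prop := ∀ (nums : List Int) (k : Int), Dom_maxSubsequence nums k → Pre_maxSubsequence nums k → Spec_maxSubsequence nums k (maxSubsequence nums k)

-- ===== LEMMAS AND PROOFS =====

-- proof-side threshold scan (keep x > v always, x = v while the budget r lasts): the
-- common intermediate between A's counter scan and B's counting filter
def pvStepB (v : Int) (st : Int × List Int) (x : Int) : Int × List Int :=
  if v < x then (st.1, st.2 ++ [x])
  else if x = v ∧ st.1 > 0 then (st.1 - 1, st.2 ++ [x])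
  else st

-- A's scan with an all-zero counter keeps nothing
lemma foldA_zero (l : List Int) (d : PySem.Dict Int Int) (acc : List Int)
    (h : ∀ x, d.getD x 0 = 0) : (l.foldl pvStepA (d, acc)).2 = acc := by
  induction l generalizing acc with
  | nil => rfl
  | cons hd tl ih =>
      have hstep : pvStepA (d, acc) hd = (d, acc) := by simp [pvStepA, h hd]
      rw [List.foldl_cons, hstep]
      exact ih acc

-- A's scan with a counter holding the full multiset of l keeps everything
lemma foldA_full (l : List Int) (d : PySem.Dict Int Int) (acc : List Int)
    (h : ∀ x, d.getD x 0 = (l.count x : Int)) : (l.foldl pvStepA (d, acc)).2 = acc ++ l := by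
  induction l generalizing d acc with
  | nil => simp
  | cons hd tl ih =>
      have hpos : d.getD hd 0 > 0 := by
        rw [h hd, List.count_cons_self]; push_cast; positivity
      simp only [List.foldl_cons, pvStepA, if_pos hpos]
      rw [ih _ _ ?_]
      · simp
      · intro x
        by_cases hx : x = hd
        · subst hx
          rw [PySem.Dict.getD_insert_self, h x, List.count_cons_self]
          push_cast; ring
        · rw [PySem.Dict.getD_insert_of_ne _ _ _ hx, h x]
          simp [Ne.symm hx]

-- the core simulation: A's counter scan equals the threshold scan
lemma scan_eq (l : List Int) (v : Int) (d : PySem.Dict Int Int) (r : Int) (acc : List Int)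
    (hgt : ∀ x, v < x → d.getD x 0 = (l.count x : Int))
    (hv : d.getD v 0 = r)
    (hlt : ∀ x, x < v → d.getD x 0 = 0) :
    (l.foldl pvStepA (d, acc)).2 = (l.foldl (pvStepB v) (r, acc)).2 := by
  induction l generalizing d r acc with
  | nil => rfl
  | cons hd tl ih =>
      simp only [List.foldl_cons, pvStepA, pvStepB]
      rcases lt_trichotomy v hd with hc | hc | hc
      · -- hd > v : both take
        have hcount : d.getD hd 0 = (List.count hd (hd :: tl) : Int) := hgt hd hc
        have hpos : d.getD hd 0 > 0 := by
          rw [hcount, List.count_cons_self]; push_cast; positivity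
        rw [if_pos hpos, if_pos hc]
        apply ih
        · intro x hx
          by_cases hxhd : x = hd
          · subst hxhd
            rw [PySem.Dict.getD_insert_self, hcount, List.count_cons_self]
            push_cast; ring
          · rw [PySem.Dict.getD_insert_of_ne _ _ _ hxhd, hgt x hx]
            simp [Ne.symm hxhd]
        · rw [PySem.Dict.getD_insert_of_ne _ _ _ (by omega : v ≠ hd)]
          exact hv
        · intro x hx
          rw [PySem.Dict.getD_insert_of_ne _ _ _ (by omega : x ≠ hd)]
          exact hlt x hx
      · -- hd = v
        subst hc
        by_cases hr : r > 0
        · rw [if_pos (by rw [hv]; exact hr), if_neg (lt_irrefl v), if_pos ⟨rfl, hr⟩]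
          apply ih
          · intro x hx
            have hne : x ≠ v := by omega
            rw [PySem.Dict.getD_insert_of_ne _ _ _ hne, hgt x hx]
            simp [Ne.symm hne]
          · rw [PySem.Dict.getD_insert_self, hv]
          · intro x hx
            rw [PySem.Dict.getD_insert_of_ne _ _ _ (by omega : x ≠ v)]
            exact hlt x hx
        · rw [if_neg (by rw [hv]; exact hr), if_neg (lt_irrefl v), if_neg (by tauto)]
          apply ih
          · intro x hx
            have hne : x ≠ v := by omega
            rw [hgt x hx]
            simp [Ne.symm hne]
          · exact hv
          · exact hlt
      · -- hd < v : neither takes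
        rw [if_neg (by rw [hlt hd hc]; omega), if_neg (by omega),
            if_neg (by exact fun h => absurd h.1 (by omega))]
        apply ih
        · intro x hx
          have hne : x ≠ hd := by omega
          rw [hgt x hx]
          simp [Ne.symm hne]
        · exact hv
        · exact hlt

-- elements of sorted(nums) taken before index m are ≤ sorted(nums)[m]; dropped after, ≥
lemma mem_take_le (nums : List Int) (m : Nat) (hm : m < (PySem.List.sorted nums (fun x => x)).length)
    (x : Int) (hx : x ∈ (PySem.List.sorted nums (fun x => x)).take m) :
    x ≤ (PySem.List.sorted nums (fun x => x))[m] := by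
  obtain ⟨i, hi, hix⟩ := List.mem_iff_getElem.mp hx
  rw [List.getElem_take] at hix
  subst hix
  exact PySem.List.sorted_id_getElem_mono nums (by simp at hi; omega) hm

lemma mem_drop_ge (nums : List Int) (m : Nat) (hm : m < (PySem.List.sorted nums (fun x => x)).length)
    (x : Int) (hx : x ∈ (PySem.List.sorted nums (fun x => x)).drop m) :
    (PySem.List.sorted nums (fun x => x))[m] ≤ x := by
  obtain ⟨i, hi, hix⟩ := List.mem_iff_getElem.mp hx
  rw [List.getElem_drop] at hix
  subst hix
  exact PySem.List.sorted_id_getElem_mono nums (Nat.le_add_right m i) _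

-- counting elements ≥ x splits into strictly-greater plus equal
lemma countP_lt_add_count (l : List Int) (x : Int) :
    l.countP (fun y => decide (x < y)) + l.count x = l.countP (fun y => decide (x ≤ y)) := by
  induction l with
  | nil => simp
  | cons hd tl ih =>
      rw [List.countP_cons, List.countP_cons, List.count_cons]
      rcases lt_trichotomy x hd with h | h | h
      · rw [decide_eq_true h, decide_eq_true (le_of_lt h), beq_eq_false_iff_ne.mpr (by omega)]
        simp; omega
      · subst h
        rw [decide_eq_false (lt_irrefl x), decide_eq_true (le_refl x), beq_self_eq_true]
        simp; omega
      · rw [decide_eq_false (by omega : ¬ x < hd), decide_eq_false (by omega : ¬ x ≤ hd),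
            beq_eq_false_iff_ne.mpr (by omega)]
        simp; omega

-- beats(i) is always below the length of the list
lemma beats_lt_length (nums : List Int) (j : Nat) (hj : j < nums.length) :
    nums.countP (fun y => decide (nums[j] < y)) + (nums.take j).count nums[j] < nums.length := by
  have hsplit : (nums.take j).countP (fun y => decide (nums[j] < y))
        + (nums.drop j).countP (fun y => decide (nums[j] < y))
      = nums.countP (fun y => decide (nums[j] < y)) := by
    rw [← List.countP_append, List.take_append_drop]
  have hdrop : nums.drop j = nums[j] :: nums.drop (j + 1) := List.drop_eq_getElem_cons hj
  have h1 : (nums.drop j).countP (fun y => decide (nums[j] < y)) ≤ nums.length - (j + 1) := by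
    rw [hdrop, List.countP_cons, decide_eq_false (lt_irrefl nums[j])]
    have := List.countP_le_length (l := nums.drop (j + 1)) (p := fun y => decide (nums[j] < y))
    simp only [List.length_drop] at this
    simp only [Bool.false_eq_true, if_false]
    omega
  have h2 : (nums.take j).count nums[j]
      ≤ (nums.take j).countP (fun a => decide ¬(decide (nums[j] < a) = true)) := by
    apply List.countP_mono_left
    intro a _ ha
    simp only [beq_iff_eq] at ha
    simp [ha]
  have h3 := List.length_eq_countP_add_countP (fun y => decide (nums[j] < y)) (l := nums.take j)
  have h4 : (nums.take j).length = j := List.length_take_of_le (le_of_lt hj)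
  omega

-- the threshold scan is the filter "x > v, or x = v and fewer than `need` copies of v before it"
lemma scanB_filter (nums : List Int) (v need : Int) :
    ∀ (l pre acc : List Int), nums = pre ++ l →
    (l.foldl (pvStepB v) (max (need - (pre.count v : Int)) 0, acc)).2
    = acc ++ ((PySem.List.enumerate l (pre.length : Int)).filter
        (fun p => decide (v < p.2) || (decide (p.2 = v) && decide (((nums.take p.1.toNat).count v : Int) < need)))).map (·.2) := by
  intro l
  induction l with
  | nil => intro pre acc _; simp [PySem.List.enumerate_nil]
  | cons x tl ih =>
      intro pre acc hn
      have htake : nums.take pre.length = pre := by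
        rw [hn, List.take_left]
      rw [PySem.List.enumerate_cons, List.foldl_cons]
      have hlen1 : (pre.length : Int) + 1 = (((pre ++ [x]).length : Nat) : Int) := by simp
      rcases lt_trichotomy v x with hc | hc | hc
      · -- x > v : taken, budget untouched
        have hstep : pvStepB v (max (need - (pre.count v : Int)) 0, acc) x
            = (max (need - (pre.count v : Int)) 0, acc ++ [x]) := by
          unfold pvStepB; rw [if_pos hc]
        have hcnt : (pre ++ [x]).count v = pre.count v := by
          simp [List.count_append, show ¬ x = v from by omega]
        rw [hstep, List.filter_cons_of_pos (by simp [htake, hc]), List.map_cons, hlen1]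
        have ih' := ih (pre ++ [x]) (acc ++ [x]) (by simpa using hn)
        rw [hcnt] at ih'
        rw [ih']
        simp
      · -- x = v : taken iff budget positive
        subst hc
        have hcnt : (pre ++ [v]).count v = pre.count v + 1 := by
          simp [List.count_append]
        by_cases hb : (pre.count v : Int) < need
        · have hr : max (need - (pre.count v : Int)) 0 = need - (pre.count v : Int) := by omega
          rw [hr]
          have hstep : pvStepB v (need - (pre.count v : Int), acc) v
              = (need - (pre.count v : Int) - 1, acc ++ [v]) := by
            unfold pvStepB; rw [if_neg (lt_irrefl v), if_pos ⟨rfl, by omega⟩]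
          have hr' : need - (pre.count v : Int) - 1
              = max (need - (((pre ++ [v]).count v : Nat) : Int)) 0 := by
            rw [hcnt]; push_cast; omega
          rw [hstep, hr',
              List.filter_cons_of_pos (by simp [htake, hb]), List.map_cons, hlen1]
          rw [ih (pre ++ [v]) (acc ++ [v]) (by simpa using hn)]
          simp
        · have hstep : pvStepB v (max (need - (pre.count v : Int)) 0, acc) v
              = (max (need - (pre.count v : Int)) 0, acc) := by
            unfold pvStepB
            rw [if_neg (lt_irrefl v), if_neg (by rintro ⟨-, h⟩; omega)]
          have hr' : max (need - (pre.count v : Int)) 0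
              = max (need - (((pre ++ [v]).count v : Nat) : Int)) 0 := by
            rw [hcnt]; push_cast; omega
          rw [hstep, hr',
              List.filter_cons_of_neg (by simp [htake, hb]), hlen1]
          exact ih (pre ++ [v]) acc (by simpa using hn)
      · -- x < v : skipped
        have hstep : pvStepB v (max (need - (pre.count v : Int)) 0, acc) x
            = (max (need - (pre.count v : Int)) 0, acc) := by
          unfold pvStepB
          rw [if_neg (by omega), if_neg (by rintro ⟨h, -⟩; omega)]
        have hcnt : (pre ++ [x]).count v = pre.count v := by
          simp [List.count_append, show ¬ x = v from by omega]
        rw [hstep,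
            List.filter_cons_of_neg (by
              simp [htake]
              exact ⟨le_of_lt hc, fun h => absurd h (by omega)⟩),
            hlen1]
        have ih' := ih (pre ++ [x]) acc (by simpa using hn)
        rw [hcnt] at ih'
        exact ih'

-- B's counting condition coincides with the threshold condition
lemma cond_iff (nums : List Int) (k need v : Int) (j : Nat) (hj : j < nums.length)
    (hGv : (nums.countP (fun y => decide (v < y)) : Int) = k - need)
    (hneed : 1 ≤ need)
    (hge : k ≤ (nums.countP (fun y => decide (v ≤ y)) : Int)) :
    ((nums.countP (fun y => decide (nums[j] < y)) : Int)
      + ((nums.take j).count nums[j] : Int) < k)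
    ↔ (v < nums[j] ∨ (nums[j] = v ∧ ((nums.take j).count v : Int) < need)) := by
  rcases lt_trichotomy v nums[j] with hc | hc | hc
  · -- kept for sure: fewer than k elements beat it
    constructor
    · intro _; exact Or.inl hc
    · intro _
      have h1 : nums.countP (fun y => decide (nums[j] < y)) + nums.count nums[j]
          ≤ nums.countP (fun y => decide (v < y)) := by
        rw [countP_lt_add_count]
        apply List.countP_mono_left
        intro a _ ha
        simp only [decide_eq_true_eq] at ha ⊢
        omega
      have h2 : (nums.take j).count nums[j] + 1 ≤ nums.count nums[j] := by
        have hdrop : nums.drop j = nums[j] :: nums.drop (j + 1) := List.drop_eq_getElem_cons hj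
        have : (nums.take j).count nums[j] + (nums.drop j).count nums[j] = nums.count nums[j] := by
          rw [← List.count_append, List.take_append_drop]
        rw [hdrop, List.count_cons_self] at this
        omega
      omega
  · -- equal to the threshold: kept iff fewer than `need` earlier copies
    rw [← hc]
    constructor
    · intro h; exact Or.inr ⟨rfl, by omega⟩
    · rintro (h | ⟨-, h⟩)
      · omega
      · omega
  · -- below the threshold: at least k elements beat it
    constructor
    · intro h
      exfalso
      have h1 : nums.countP (fun y => decide (v ≤ y)) ≤ nums.countP (fun y => decide (nums[j] < y)) := by
        apply List.countP_mono_left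
        intro a _ ha
        simp only [decide_eq_true_eq] at ha ⊢
        omega
      omega
    · rintro (h | ⟨h, -⟩) <;> omega

-- ===== VERDICT (by name: the statement is the Claim_ definition above) =====
theorem maxSubsequence_spec : Claim_equal_maxSubsequence := by
  intro nums k _hdom hpre
  show maxSubsequence nums k = maxSubsequence_alt nums k
  simp only [maxSubsequence, maxSubsequence_alt]
  set s := PySem.List.sorted nums (fun x => x) with hs
  have hperm : s.Perm nums := PySem.List.sorted_perm nums (fun x => x) false
  have hslen : s.length = nums.length := PySem.List.length_sorted nums (fun x => x) false
  by_cases hk1 : k ≤ 0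
  · -- excluded unless k + len(nums) ≤ 0; then the slice is empty and both sides are []
    have hn : k + (nums.length : Int) ≤ 0 := by
      rcases hpre with h | h
      · omega
      · exact h
    have h1 : PySem.List.slice s (some (-k)) none = [] := by
      have he : -k = (((-k).toNat : Nat) : Int) := by omega
      rw [he, PySem.List.slice_from_natCast]
      apply List.drop_eq_nil_of_le
      omega
    rw [h1]
    rw [foldA_zero nums _ [] (by intro x; rw [PySem.Dict.getD_counter]; simp)]
    symm
    rw [List.map_eq_nil_iff, List.filter_eq_nil_iff]
    intro p _
    simp only [decide_eq_true_eq, pvBeats]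
    intro hlt
    have := Int.natCast_nonneg (nums.countP (fun y => decide (p.2 < y)))
    have := Int.natCast_nonneg ((PySem.List.slice nums none (some p.1)).countP (fun y => decide (y = p.2)))
    omega
  · rw [not_le] at hk1
    by_cases hkn : (nums.length : Int) ≤ k
    · -- k ≥ len(nums): the slice is all of sorted(nums), both sides return nums
      have h1 : PySem.List.slice s (some (-k)) none = s := by
        have he : -k = -((k.toNat : Nat) : Int) := by omega
        rw [he, PySem.List.slice_from_neg_natCast _ _ (by omega)]
        have : s.length - k.toNat = 0 := by omega
        rw [this, List.drop_zero]
      rw [h1]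
      rw [foldA_full nums _ [] (by intro x; rw [PySem.Dict.getD_counter, hperm.count_eq])]
      symm
      rw [List.nil_append]
      have hall : (PySem.List.enumerate nums).filter
          (fun p => decide (pvBeats nums p.1 p.2 < k)) = PySem.List.enumerate nums := by
        rw [List.filter_eq_self]
        intro p hp
        obtain ⟨j, hjlt, hp⟩ := (PySem.List.mem_enumerate_iff _ _ _).mp hp
        subst hp
        simp only [decide_eq_true_eq, pvBeats, zero_add]
        rw [PySem.List.slice_to_natCast]
        have hb := beats_lt_length nums j hjlt
        have hcnt : (nums.take j).countP (fun y => decide (y = nums[j])) = (nums.take j).count nums[j] := by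
          apply List.countP_congr
          intro a _
          simp
        rw [hcnt]
        omega
      rw [hall, PySem.List.map_snd_enumerate]
    · -- main case 0 < k < len(nums)
      rw [not_le] at hkn
      set m : Nat := s.length - k.toNat with hmdef
      have hm : m < s.length := by omega
      set v₀ : Int := s[m] with hv0
      set need : Int := k - (nums.countP (fun y => decide (v₀ < y)) : Int) with hneeddef
      -- the slice sorted(nums)[-k:] is the suffix from index m
      have h1 : PySem.List.slice s (some (-k)) none = s.drop m := by
        have he : -k = -((k.toNat : Nat) : Int) := by omega
        rw [he, PySem.List.slice_from_neg_natCast _ _ (by omega)]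
      rw [h1]
      set t : List Int := s.drop m with ht
      have hsplit : s = s.take m ++ t := (List.take_append_drop m s).symm
      have htlen : t.length = k.toNat := by
        rw [ht, List.length_drop]; omega
      have htop : ∀ x, v₀ < x → t.count x = nums.count x := by
        intro x hx
        have h0 : (s.take m).count x = 0 := by
          rw [List.count_eq_zero]
          intro hmem
          exact absurd (mem_take_le nums m hm x hmem) (not_le.mpr hx)
        have := hperm.count_eq x
        rw [hsplit, List.count_append, h0] at this
        omega
      have hbot : ∀ x, x < v₀ → t.count x = 0 := by
        intro x hx
        rw [List.count_eq_zero]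
        intro hmem
        exact absurd (mem_drop_ge nums m hm x hmem) (not_le.mpr hx)
      have hfilter : nums.countP (fun y => decide (v₀ < y)) = t.countP (fun y => decide (v₀ < y)) := by
        rw [← hperm.countP_eq]
        rw [hsplit, List.countP_append]
        have h0 : (s.take m).countP (fun y => decide (v₀ < y)) = 0 := by
          rw [List.countP_eq_zero]
          intro a ha
          have hle : a ≤ v₀ := mem_take_le nums m hm a ha
          simpa using not_lt.mpr hle
        omega
      have hcv : t.count v₀ + t.countP (fun y => decide (v₀ < y)) = k.toNat := by
        have hlen := List.length_eq_countP_add_countP (fun y => decide (v₀ < y)) (l := t)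
        have hnotc : t.countP (fun a => decide ¬decide (v₀ < a) = true) = t.count v₀ := by
          rw [List.count]
          apply List.countP_congr
          intro a ha
          have h1 : v₀ ≤ a := mem_drop_ge nums m hm a ha
          by_cases hav : a = v₀
          · subst hav; simp
          · simp [hav, show v₀ < a by omega]
        omega
      have htv : 1 ≤ t.count v₀ := by
        apply List.count_pos_iff.mpr
        rw [ht]
        have : s[m] ∈ s.drop m := by
          rw [List.drop_eq_getElem_cons hm]
          exact List.mem_cons_self
        exact this
      have hneed : 1 ≤ need := by
        rw [hneeddef, hfilter]; omega
      have hge : k ≤ (nums.countP (fun y => decide (v₀ ≤ y)) : Int) := by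
        have hsub : t.countP (fun y => decide (v₀ ≤ y)) ≤ s.countP (fun y => decide (v₀ ≤ y)) :=
          (List.drop_sublist m s).countP_le
        have hall : t.countP (fun y => decide (v₀ ≤ y)) = t.length := by
          rw [List.countP_eq_length]
          intro a ha
          exact decide_eq_true (mem_drop_ge nums m hm a ha)
        rw [← hperm.countP_eq]
        omega
      -- counter scan → threshold scan
      rw [scan_eq nums v₀ _ need [] ?_ ?_ ?_]
      · -- threshold scan → counting filter
        have := scanB_filter nums v₀ need nums [] [] rfl
        simp only [List.count_nil, Int.natCast_zero, sub_zero, List.length_nil, Int.natCast_zero,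
          List.nil_append] at this
        rw [max_eq_left (by omega : (0:Int) ≤ need)] at this
        rw [this]
        congr 1
        apply List.filter_congr
        intro p hp
        obtain ⟨j, hjlt, hp⟩ := (PySem.List.mem_enumerate_iff _ _ _).mp hp
        subst hp
        simp only [zero_add, Int.toNat_natCast]
        have hE : (nums.take j).countP (fun y => decide (y = nums[j])) = (nums.take j).count nums[j] := by
          apply List.countP_congr
          intro a _
          simp
        have hiff := cond_iff nums k need v₀ j hjlt (by omega) hneed hge
        simp only [pvBeats, PySem.List.slice_to_natCast, hE]
        rw [show (decide (v₀ < nums[j]) || (decide (nums[j] = v₀) && decide (((nums.take j).count v₀ : Int) < need)))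
              = decide (v₀ < nums[j] ∨ (nums[j] = v₀ ∧ ((nums.take j).count v₀ : Int) < need)) by
            simp [Bool.decide_or, Bool.decide_and]]
        simp only [decide_eq_decide]
        exact hiff.symm
      · intro x hx
        rw [PySem.Dict.getD_counter, htop x hx]
      · rw [PySem.Dict.getD_counter, hneeddef, hfilter]
        omega
      · intro x hx
        rw [PySem.Dict.getD_counter, hbot x hx]
        simp
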